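-- pv_equiv track=rewrite | github.com/rukshar69/ProjectEuler100 | prb51.py | basicPattern
-- ===== SOURCE A (Python) =====
-- def basicPattern(pattern,number):
--
--     t = number
--     sz = len(pattern)
--     filledPattern = [0 for i in range(sz)]
--     for i in range(sz-1,-1,-1):
--         if pattern[i] == 1:
--             filledPattern[i] = t%10
--             t//=10
--         else: filledPattern[i]=-1
--     return filledPattern
-- ===== SOURCE B (Python) =====
-- def basicPattern(pattern, number):
--     # forward pass: each 1-position's digit computed independently from
--     # number // 10**j where j = count of 1-positions strictly to its right
--     k = sum(1 for p in pattern if p == 1)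
--     filled = []
--     seen = 0
--     for p in pattern:
--         if p == 1:
--             seen += 1
--             filled.append((number // 10 ** (k - seen)) % 10)
--         else:
--             filled.append(-1)
--     return filled
-- ===== Notes on version B (the rewrite author's own statement) =====
-- stated objective: alternative
-- what changed: B replaces A's right-to-left loop that threads a running quotient t through a mutable preallocated array by a single forward pass in which each 1-position's digit is computed independently as (number // 10**(ones to its right)) % 10 from a precomputed count of 1s.
import Mathlib
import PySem

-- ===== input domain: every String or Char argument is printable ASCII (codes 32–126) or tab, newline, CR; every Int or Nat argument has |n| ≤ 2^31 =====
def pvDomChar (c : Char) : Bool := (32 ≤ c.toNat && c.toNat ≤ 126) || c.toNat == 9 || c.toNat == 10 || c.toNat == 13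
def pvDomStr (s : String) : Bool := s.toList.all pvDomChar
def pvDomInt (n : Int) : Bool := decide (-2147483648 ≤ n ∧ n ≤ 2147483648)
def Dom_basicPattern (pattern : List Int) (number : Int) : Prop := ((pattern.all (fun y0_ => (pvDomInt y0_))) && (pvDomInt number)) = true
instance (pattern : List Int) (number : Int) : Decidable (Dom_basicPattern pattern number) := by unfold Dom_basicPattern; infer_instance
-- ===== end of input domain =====

-- B fills each 1-position independently via (number // 10**j) % 10 in one forward pass
-- instead of A's right-to-left loop threading a running quotient through a mutable array.

-- ===== PORT A =====
-- loop body of A's 'for i in range(sz-1,-1,-1)'; i is always a valid nonnegative index,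
-- so '.getD 0' never fires and 'i.toNat' is exact here.
def bpStep (p : List Int) (st : List Int × Int) (i : Int) : List Int × Int :=
  if (PySem.List.pyGet? p i).getD 0 == 1 then
    (st.1.set i.toNat (PySem.Int.mod st.2 10), PySem.Int.floordiv st.2 10)
  else (st.1.set i.toNat (-1), st.2)

def basicPattern (pattern : List Int) (number : Int) : List Int :=
  let t := number
  let sz : Int := (pattern.length : Int)
  let filledPattern : List Int := (PySem.List.pyRange 0 sz 1).map (fun _ => (0 : Int))
  ((PySem.List.pyRange (sz - 1) (-1) (-1)).foldl (bpStep pattern) (filledPattern, t)).1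

-- ===== PORT B =====
-- B's forward loop over pattern with the running count 'seen' of 1s consumed so far;
-- exponent k - seen is always ≥ 0, so '.toNat' is exact here.
def bpFill (number k : Int) : List Int → Int → List Int
  | [], _ => []
  | p :: rest, seen =>
    if p == 1 then
      PySem.Int.mod (PySem.Int.floordiv number ((10 : Int) ^ (k - (seen + 1)).toNat)) 10
        :: bpFill number k rest (seen + 1)
    else (-1) :: bpFill number k rest seen

def basicPattern_alt (pattern : List Int) (number : Int) : List Int :=
  let k : Int := pattern.foldl (fun acc p => if p == 1 then acc + 1 else acc) 0
  bpFill number k pattern 0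

-- ===== PRECONDITION & SPEC =====
def Spec_basicPattern (pattern : List Int) (number : Int) (out : List Int) : Prop := out = basicPattern_alt pattern number
instance (pattern : List Int) (number : Int) (out : List Int) : Decidable (Spec_basicPattern pattern number out) := by unfold Spec_basicPattern; infer_instance

-- ===== CLAIM (what is proved, stated in full; the proofs are below) =====
def Claim_equal_basicPattern : Prop := ∀ (pattern : List Int) (number : Int), Dom_basicPattern pattern number → Spec_basicPattern pattern number (basicPattern pattern number)

-- ===== LEMMAS AND PROOFS =====

-- number of 1s in a list, as an Int
def bpOnes (xs : List Int) : Int := (xs.countP (fun p => p == 1) : Int)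

theorem bpOnes_nonneg (xs : List Int) : 0 ≤ bpOnes xs := by
  simp [bpOnes]

theorem bpOnes_nil : bpOnes [] = 0 := by simp [bpOnes]

theorem bpOnes_cons (p : Int) (xs : List Int) :
    bpOnes (p :: xs) = (if p == 1 then 1 else 0) + bpOnes xs := by
  simp [bpOnes, List.countP_cons]
  by_cases h : p = 1 <;> simp [h] <;> omega

-- the counting foldl of B computes acc + bpOnes xs
theorem bpCount_foldl (xs : List Int) : ∀ (acc : Int),
    xs.foldl (fun acc p => if p == 1 then acc + 1 else acc) acc = acc + bpOnes xs := by
  induction xs with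
  | nil => intro acc; simp [bpOnes_nil]
  | cons p rest ih =>
    intro acc
    rw [List.foldl_cons, ih, bpOnes_cons]
    by_cases h : p = 1 <;> simp [h] <;> ring

-- bpFill on a snoc: the appended element's exponent is k - (s + ones xs + 1)
theorem bpFill_snoc (n k x : Int) (xs : List Int) : ∀ (s : Int),
    bpFill n k (xs ++ [x]) s =
      bpFill n k xs s ++
        [if x == 1 then
          PySem.Int.mod (PySem.Int.floordiv n ((10 : Int) ^ (k - (s + bpOnes xs + 1)).toNat)) 10
        else -1] := by
  induction xs with
  | nil => intro s; by_cases h : x = 1 <;> simp [bpFill, h, bpOnes_nil]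
  | cons p rest ih =>
    intro s
    by_cases h : p = 1
    · simp only [List.cons_append, bpFill, h, BEq.rfl, if_true, ih (s + 1), bpOnes_cons]
      simp [h]
      ring_nf
    · simp only [List.cons_append, bpFill, beq_iff_eq, h, if_false, ih s, bpOnes_cons]
      simp [h]

theorem bp_floordiv_floordiv (n : Int) (j : Nat) :
    PySem.Int.floordiv (PySem.Int.floordiv n 10) ((10 : Int) ^ j) =
      PySem.Int.floordiv n ((10 : Int) ^ (j + 1)) := by
  rw [PySem.Int.floordiv_eq_ediv_of_pos (by norm_num : (0:Int) < 10),
      PySem.Int.floordiv_eq_ediv_of_pos (by positivity : (0:Int) < (10:Int) ^ j),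
      PySem.Int.floordiv_eq_ediv_of_pos (by positivity : (0:Int) < (10:Int) ^ (j + 1))]
  rw [Int.ediv_ediv_eq_ediv_mul (by norm_num : (0:Int) ≤ 10)]
  rw [pow_succ]
  ring_nf

-- shifting: peeling one digit off n is the same as raising every exponent by one
theorem bpFill_shift (xs : List Int) : ∀ (s k n : Int), s + bpOnes xs ≤ k →
    bpFill (PySem.Int.floordiv n 10) k xs s = bpFill n (k + 1) xs s := by
  induction xs with
  | nil => intro s k n _; simp [bpFill]
  | cons p rest ih =>
    intro s k n hle
    rw [bpOnes_cons] at hle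
    by_cases h : p = 1
    · have hrest : (s + 1) + bpOnes rest ≤ k := by simp [h] at hle; omega
      have h0 : 0 ≤ k - (s + 1) := by
        have := bpOnes_nonneg rest; omega
      simp only [bpFill, h, BEq.rfl, if_true, ih (s + 1) k n hrest]
      have hexp : (k + 1 - (s + 1)).toNat = (k - (s + 1)).toNat + 1 := by omega
      rw [hexp, bp_floordiv_floordiv]
    · have hrest : s + bpOnes rest ≤ k := by
        have := bpOnes_nonneg rest
        simp [h] at hle; omega
      simp only [bpFill]
      rw [if_neg (by simp [h]), if_neg (by simp [h]), ih s k n hrest]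

-- characterisation of B's port
theorem alt_eq_bpFill (xs : List Int) (n : Int) :
    basicPattern_alt xs n = bpFill n (bpOnes xs) xs 0 := by
  show bpFill n (xs.foldl (fun acc p => if p == 1 then acc + 1 else acc) 0) xs 0 = _
  rw [bpCount_foldl]
  simp

-- A's loop body reads the same value on (xs ++ [x]) as on xs for in-range indices,
-- and setting below the appended slot commutes with the append
theorem bpStep_append (xs : List Int) (x : Int) (st : List Int × Int) (v i : Int)
    (h0 : 0 ≤ i) (h1 : i < (xs.length : Int)) (hlen : st.1.length = xs.length) :
    bpStep (xs ++ [x]) (st.1 ++ [v], st.2) i =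
      ((bpStep xs st i).1 ++ [v], (bpStep xs st i).2) := by
  have hi : i.toNat < xs.length := by omega
  have hget : PySem.List.pyGet? (xs ++ [x]) i = PySem.List.pyGet? xs i := by
    rw [PySem.List.pyGet?_of_nonneg _ h0, PySem.List.pyGet?_of_nonneg _ h0]
    rw [List.getElem?_append_left hi]
  have hset : ∀ (d : Int), (st.1 ++ [v]).set i.toNat d = st.1.set i.toNat d ++ [v] := by
    intro d
    rw [List.set_append]
    simp [hlen, hi]
  simp only [bpStep, hget]
  split <;> simp [hset]

theorem bpStep_len (p : List Int) (st : List Int × Int) (i : Int) :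
    (bpStep p st i).1.length = st.1.length := by
  simp only [bpStep]; split <;> simp

-- the whole remaining fold commutes with the appended slot
theorem fold_append (xs : List Int) (x v : Int) :
    ∀ (L : List Int), (∀ i ∈ L, 0 ≤ i ∧ i < (xs.length : Int)) →
    ∀ (fp : List Int) (t : Int), fp.length = xs.length →
    L.foldl (bpStep (xs ++ [x])) (fp ++ [v], t) =
      ((L.foldl (bpStep xs) (fp, t)).1 ++ [v], (L.foldl (bpStep xs) (fp, t)).2) := by
  intro L
  induction L with
  | nil => intro _ fp t _; simp
  | cons i rest ih =>
    intro hmem fp t hlen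
    have hi := hmem i (List.mem_cons_self ..)
    have hstep := bpStep_append xs x (fp, t) v i hi.1 hi.2 hlen
    simp only [List.foldl_cons]
    rw [hstep, ih (fun j hj => hmem j (List.mem_cons_of_mem _ hj))]
    rw [bpStep_len]; exact hlen

theorem bpZeros (n : Nat) :
    (PySem.List.pyRange 0 (n : Int) 1).map (fun _ => (0 : Int)) = List.replicate n 0 := by
  rw [List.map_const']
  congr 1
  rw [PySem.List.length_pyRange_one]
  omega

-- A on a snoc: the last slot is handled first, then the prefix runs as A on xs
theorem basicPattern_snoc (xs : List Int) (x n : Int) :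
    basicPattern (xs ++ [x]) n =
      if x == 1 then basicPattern xs (PySem.Int.floordiv n 10) ++ [PySem.Int.mod n 10]
      else basicPattern xs n ++ [-1] := by
  have hlen : ((xs ++ [x]).length : Int) = (xs.length : Int) + 1 := by simp
  have hrange : PySem.List.pyRange ((xs.length : Int) + 1 - 1) (-1) (-1) =
      (xs.length : Int) :: PySem.List.pyRange ((xs.length : Int) - 1) (-1) (-1) := by
    have : ((xs.length : Int) + 1 - 1) = (xs.length : Int) := by ring
    rw [this, PySem.List.pyRange_neg_one_cons (by omega)]
  have hzeros : (PySem.List.pyRange 0 ((xs.length : Int) + 1) 1).map (fun _ => (0 : Int)) =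
      List.replicate xs.length 0 ++ [0] := by
    have : ((xs.length : Int) + 1) = ((xs.length + 1 : Nat) : Int) := by push_cast; ring
    rw [this, bpZeros]
    simp [List.replicate_succ']
  have hget : PySem.List.pyGet? (xs ++ [x]) (xs.length : Int) = some x := by
    have := PySem.List.pyGet?_append_length (pre := xs) (y := x) (ys := [])
    simpa using this
  have hmem : ∀ i ∈ PySem.List.pyRange ((xs.length : Int) - 1) (-1) (-1),
      0 ≤ i ∧ i < (xs.length : Int) := by
    intro i hi
    rw [PySem.List.mem_pyRange_neg_one] at hi
    omega
  have hsetlast : ∀ (d : Int),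
      (List.replicate xs.length (0 : Int) ++ [0]).set ((xs.length : Int)).toNat d =
        List.replicate xs.length 0 ++ [d] := by
    intro d
    have : ((xs.length : Int)).toNat = xs.length := by omega
    rw [this, List.set_append]
    simp
  simp only [basicPattern, hlen, hrange, hzeros, List.foldl_cons]
  by_cases hx : x = 1
  · subst hx
    have hstep1 : bpStep (xs ++ [1]) (List.replicate xs.length 0 ++ [0], n) (xs.length : Int) =
        (List.replicate xs.length 0 ++ [PySem.Int.mod n 10], PySem.Int.floordiv n 10) := by
      simp only [bpStep, hget, Option.getD_some, BEq.rfl, if_true]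
      rw [hsetlast]
    rw [hstep1, fold_append xs 1 (PySem.Int.mod n 10) _ hmem _ _ (by simp)]
    rw [bpZeros xs.length]
    simp
  · have hstep0 : bpStep (xs ++ [x]) (List.replicate xs.length 0 ++ [0], n) (xs.length : Int) =
        (List.replicate xs.length 0 ++ [-1], n) := by
      simp only [bpStep, hget, Option.getD_some]
      rw [if_neg (by simp [hx]), hsetlast]
    rw [hstep0, fold_append xs x (-1) _ hmem _ _ (by simp)]
    rw [bpZeros xs.length]
    simp [hx]

theorem bp_main (xs : List Int) : ∀ (n : Int), basicPattern xs n = basicPattern_alt xs n := by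
  induction xs using List.reverseRecOn with
  | nil =>
    intro n
    simp [basicPattern, basicPattern_alt, bpFill]
  | append_singleton xs x ih =>
    intro n
    rw [basicPattern_snoc, alt_eq_bpFill, bpFill_snoc]
    have hones : bpOnes (xs ++ [x]) = bpOnes xs + (if x == 1 then 1 else 0) := by
      by_cases h : x = 1 <;> simp [bpOnes, List.countP_append, h]
    by_cases hx : x = 1
    · simp only [hx, BEq.rfl, if_true] at hones ⊢
      rw [hones]
      have hexp : (bpOnes xs + 1 - (0 + bpOnes xs + 1)).toNat = 0 := by omega
      rw [hexp]
      have hdiv1 : PySem.Int.floordiv n ((10 : Int) ^ (0:Nat)) = n := by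
        rw [PySem.Int.floordiv_eq_ediv_of_pos (by norm_num)]
        simp
      rw [hdiv1]
      congr 1
      rw [← bpFill_shift xs 0 (bpOnes xs) n (by simp), ih, alt_eq_bpFill]
    · have hxb : (x == 1) = false := by simp [hx]
      simp only [hxb, Bool.false_eq_true, if_false] at hones ⊢
      rw [hones]
      simp only [add_zero]
      congr 1
      rw [ih, alt_eq_bpFill]

-- ===== VERDICT (by name: the statement is the Claim_ definition above) =====
theorem basicPattern_spec : Claim_equal_basicPattern := by
  intro pattern number _
  unfold Spec_basicPattern
  exact bp_main pattern number
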